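-- pv_equiv track=rewrite | github.com/CMUChimpsLab/playstore-scraper | core/analyzer/python_static_analyzer/SearchIntents.py | is_possible_endpoint
-- ===== SOURCE A (Python) =====
-- extensions = [".com", ".net", ".org", ".edu", ".gov", ".mil",
--         ".af", ".ax",".al",".dz",".as",".ad",".ao",".ai",".aq",".ag",".ar",".am",".aw",
--         ".ac",".au",".at",".az",".bs",".bh",".bd",".bb",".eus",".by",".be",".bz",".bj",
--         ".bm",".bt",".bo",".nl",".ba",".bw",".bv",".br",".io",".vg",".bn",".bg",".bf",
--         ".mm",".bi",".kh",".cm",".ca",".cv",".cat",".ky",".cf",".td",".cl",".cn",".cx",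
--         ".co",".km",".cd",".cg",".ck",".cr",".ci",".hr",".cu",".cw",".cy",".cz",
--         ".dk",".dj",".dm",".do",".tp",".ec",".eg",".sv",".gq",".er",".ee",".et",".eu",
--         ".fk",".fo",".fm",".fj",".fi",".fr",".gf",".pf",".tf",".ga",".gal",".gm",".ps",
--         ".ge",".de",".gh",".gi",".gr",".gl",".gd",".gp",".gu",".gt",".gg",".gn",".gw",
--         ".gy",".ht",".hm",".hn",".hk",".hu",".is",".in",".id",".ir",".iq",".ie",".im",
--         ".il",".it",".jm",".jp",".je",".jo",".kz",".ke",".ki",".kw",".kg",".la",".lv",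
--         ".lb",".ls",".lr",".ly",".li",".lt",".lu",".mo",".mk",".mg",".mw",".my",".mv",
--         ".ml",".mt",".mh",".mq",".mr",".mu",".yt",".mx",".md",".mc",".mn",".me",".ms",
--         ".ma",".mz",".mm",".na",".nr",".np",".nl",".nc",".nz",".ni",".ne",".ng",".nu",
--         ".nf",".tr",".kp",".mk",".mp",".no",".om",".pk",".pw",".ps",".pa",".pg",".py",
--         ".pe",".ph",".pn",".pl",".pt",".pr",".qa",".ro",".ru",".rw",".re",".an",".fr",
--         ".sh",".kn",".lc",".fr",".pm",".vc",".ws",".sm",".st",".sa",".sn",".rs",".sc",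
--         ".sl",".sg",".nl",".an",".sk",".si",".sb",".za",".gs",".kr",".ss",
--         ".es",".lk",".sd",".sr",".sj",".sz",".se",".ch",".sy",".tw",".tj",".tz",".th",
--         ".tg",".tk",".to",".tt",".tn",".tr",".tm",".tc",".tv",".ug",".ua",".ae",".uk",
--         ".us",".vi",".uy",".uz",".vu",".va",".ve",".vn",".wf",".ma",".ye",".zm",".zw"]
--
-- def is_possible_endpoint(test_str, class_names):
--     if (test_str.startswith("http://") and
--             (test_str == "http://" or not test_str[len("http://")].isalnum())):
--         return False
--     elif (test_str.startswith("https://") and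
--             (test_str == "https://" or not test_str[len("https://")].isalnum())):
--         return False
--
--     for ext in extensions:
--         if test_str.endswith(ext) and test_str != ext and " " not in test_str:
--             return True
--
--     return False
-- ===== SOURCE B (Python) =====
-- # Same endpoint check; B stores the extensions as one whitespace-separated string
-- # split into a frozenset at import time, loops over the two URL schemes instead of
-- # two hand-written if-branches, and replaces A's 290-endswith scan by one
-- # last-dot suffix extraction plus a single set membership test.
-- EXT_SET = frozenset(w for part in (
--     ".com .net .org .edu .gov .mil .af .ax .al .dz .as .ad .ao .ai .aq .ag .ar .am .aw .ac .au .at .az .bs .bh .bd .bb .eus .by .be .bz .bj .bm .bt .bo .nl .ba",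
--     ".bw .bv .br .io .vg .bn .bg .bf .mm .bi .kh .cm .ca .cv .cat .ky .cf .td .cl .cn .cx .co .km .cd .cg .ck .cr .ci .hr .cu .cw .cy .cz .dk .dj .dm .do",
--     ".tp .ec .eg .sv .gq .er .ee .et .eu .fk .fo .fm .fj .fi .fr .gf .pf .tf .ga .gal .gm .ps .ge .de .gh .gi .gr .gl .gd .gp .gu .gt .gg .gn .gw .gy .ht",
--     ".hm .hn .hk .hu .is .in .id .ir .iq .ie .im .il .it .jm .jp .je .jo .kz .ke .ki .kw .kg .la .lv .lb .ls .lr .ly .li .lt .lu .mo .mk .mg .mw .my .mv",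
--     ".ml .mt .mh .mq .mr .mu .yt .mx .md .mc .mn .me .ms .ma .mz .mm .na .nr .np .nl .nc .nz .ni .ne .ng .nu .nf .tr .kp .mk .mp .no .om .pk .pw .ps .pa",
--     ".pg .py .pe .ph .pn .pl .pt .pr .qa .ro .ru .rw .re .an .fr .sh .kn .lc .fr .pm .vc .ws .sm .st .sa .sn .rs .sc .sl .sg .nl .an .sk .si .sb .za .gs",
--     ".kr .ss .es .lk .sd .sr .sj .sz .se .ch .sy .tw .tj .tz .th .tg .tk .to .tt .tn .tr .tm .tc .tv .ug .ua .ae .uk .us .vi .uy .uz .vu .va .ve .vn .wf",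
--     ".ma .ye .zm .zw") for w in part.split())
--
-- def is_possible_endpoint(test_str, class_names):
--     for p in ("http://", "https://"):
--         if test_str.startswith(p) and (test_str == p or not test_str[len(p)].isalnum()):
--             return False
--     if " " in test_str or "." not in test_str:
--         return False
--     last = test_str[test_str.rfind("."):]
--     return last in EXT_SET and test_str != last
-- ===== Notes on version B (the rewrite author's own statement) =====
-- stated objective: idiomatic
-- what changed: Instead of scanning all 290 extensions with endswith per candidate, B extracts the suffix from the last '.' once (rfind + slice) and does a single frozenset membership test; the set is built by splitting one whitespace-separated literal and the two scheme guards become one loop over ('http://','https://').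
import Mathlib
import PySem

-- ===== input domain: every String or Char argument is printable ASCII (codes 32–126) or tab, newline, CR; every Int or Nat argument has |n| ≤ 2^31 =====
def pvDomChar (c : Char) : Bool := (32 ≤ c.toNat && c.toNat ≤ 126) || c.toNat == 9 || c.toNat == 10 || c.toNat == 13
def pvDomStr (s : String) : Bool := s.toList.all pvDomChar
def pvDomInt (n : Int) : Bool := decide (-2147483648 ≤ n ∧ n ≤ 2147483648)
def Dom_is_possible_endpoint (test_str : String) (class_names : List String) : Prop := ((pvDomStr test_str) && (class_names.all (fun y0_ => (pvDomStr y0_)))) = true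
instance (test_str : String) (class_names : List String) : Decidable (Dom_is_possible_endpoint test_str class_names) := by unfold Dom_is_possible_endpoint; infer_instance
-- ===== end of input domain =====

-- B stores the extensions as one split string literal, loops over the two schemes, and replaces A's 290-endswith scan by one last-dot suffix extraction plus a single set lookup.


-- ===== PORT A =====
def extensions : List String := [".com", ".net", ".org", ".edu", ".gov", ".mil",
        ".af", ".ax",".al",".dz",".as",".ad",".ao",".ai",".aq",".ag",".ar",".am",".aw",
        ".ac",".au",".at",".az",".bs",".bh",".bd",".bb",".eus",".by",".be",".bz",".bj",
        ".bm",".bt",".bo",".nl",".ba",".bw",".bv",".br",".io",".vg",".bn",".bg",".bf",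
        ".mm",".bi",".kh",".cm",".ca",".cv",".cat",".ky",".cf",".td",".cl",".cn",".cx",
        ".co",".km",".cd",".cg",".ck",".cr",".ci",".hr",".cu",".cw",".cy",".cz",
        ".dk",".dj",".dm",".do",".tp",".ec",".eg",".sv",".gq",".er",".ee",".et",".eu",
        ".fk",".fo",".fm",".fj",".fi",".fr",".gf",".pf",".tf",".ga",".gal",".gm",".ps",
        ".ge",".de",".gh",".gi",".gr",".gl",".gd",".gp",".gu",".gt",".gg",".gn",".gw",
        ".gy",".ht",".hm",".hn",".hk",".hu",".is",".in",".id",".ir",".iq",".ie",".im",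
        ".il",".it",".jm",".jp",".je",".jo",".kz",".ke",".ki",".kw",".kg",".la",".lv",
        ".lb",".ls",".lr",".ly",".li",".lt",".lu",".mo",".mk",".mg",".mw",".my",".mv",
        ".ml",".mt",".mh",".mq",".mr",".mu",".yt",".mx",".md",".mc",".mn",".me",".ms",
        ".ma",".mz",".mm",".na",".nr",".np",".nl",".nc",".nz",".ni",".ne",".ng",".nu",
        ".nf",".tr",".kp",".mk",".mp",".no",".om",".pk",".pw",".ps",".pa",".pg",".py",
        ".pe",".ph",".pn",".pl",".pt",".pr",".qa",".ro",".ru",".rw",".re",".an",".fr",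
        ".sh",".kn",".lc",".fr",".pm",".vc",".ws",".sm",".st",".sa",".sn",".rs",".sc",
        ".sl",".sg",".nl",".an",".sk",".si",".sb",".za",".gs",".kr",".ss",
        ".es",".lk",".sd",".sr",".sj",".sz",".se",".ch",".sy",".tw",".tj",".tz",".th",
        ".tg",".tk",".to",".tt",".tn",".tr",".tm",".tc",".tv",".ug",".ua",".ae",".uk",
        ".us",".vi",".uy",".uz",".vu",".va",".ve",".vn",".wf",".ma",".ye",".zm",".zw"]

-- 'if test_str.startswith("http://") and (test_str == "http://" or not test_str[7].isalnum())' —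
-- the index is guarded by the '==' short-circuit, so the .getD default is unreachable
def httpGuard (test_str : String) (p : String) (i : Int) : Bool :=
  PySem.Str.startswith test_str p &&
    (test_str == p || !(PySem.Chars.isalnum ((PySem.Str.pyGet? test_str i).getD ' ')))

-- A's for-loop over extensions, returning True at the first match
def epLoopA (test_str : String) : List String → Bool
  | [] => false
  | ext :: rest =>
      if PySem.Str.endswith test_str ext && test_str != ext && !(PySem.Str.isIn " " test_str)
      then true else epLoopA test_str rest

def is_possible_endpoint (test_str : String) (class_names : List String) : Bool :=
  if httpGuard test_str "http://" 7 then false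
  else if httpGuard test_str "https://" 8 then false
  else epLoopA test_str extensions

-- ===== PORT B =====
-- B's extension table: a tuple of whitespace-separated literals, split and unioned into one set
def extPart0 : String := ".com .net .org .edu .gov .mil .af .ax .al .dz .as .ad .ao .ai .aq .ag .ar .am .aw .ac .au .at .az .bs .bh .bd .bb .eus .by .be .bz .bj .bm .bt .bo .nl .ba"
def extPart1 : String := ".bw .bv .br .io .vg .bn .bg .bf .mm .bi .kh .cm .ca .cv .cat .ky .cf .td .cl .cn .cx .co .km .cd .cg .ck .cr .ci .hr .cu .cw .cy .cz .dk .dj .dm .do"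
def extPart2 : String := ".tp .ec .eg .sv .gq .er .ee .et .eu .fk .fo .fm .fj .fi .fr .gf .pf .tf .ga .gal .gm .ps .ge .de .gh .gi .gr .gl .gd .gp .gu .gt .gg .gn .gw .gy .ht"
def extPart3 : String := ".hm .hn .hk .hu .is .in .id .ir .iq .ie .im .il .it .jm .jp .je .jo .kz .ke .ki .kw .kg .la .lv .lb .ls .lr .ly .li .lt .lu .mo .mk .mg .mw .my .mv"
def extPart4 : String := ".ml .mt .mh .mq .mr .mu .yt .mx .md .mc .mn .me .ms .ma .mz .mm .na .nr .np .nl .nc .nz .ni .ne .ng .nu .nf .tr .kp .mk .mp .no .om .pk .pw .ps .pa"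
def extPart5 : String := ".pg .py .pe .ph .pn .pl .pt .pr .qa .ro .ru .rw .re .an .fr .sh .kn .lc .fr .pm .vc .ws .sm .st .sa .sn .rs .sc .sl .sg .nl .an .sk .si .sb .za .gs"
def extPart6 : String := ".kr .ss .es .lk .sd .sr .sj .sz .se .ch .sy .tw .tj .tz .th .tg .tk .to .tt .tn .tr .tm .tc .tv .ug .ua .ae .uk .us .vi .uy .uz .vu .va .ve .vn .wf"
def extPart7 : String := ".ma .ye .zm .zw"

def extParts : List String := [extPart0, extPart1, extPart2, extPart3, extPart4, extPart5, extPart6, extPart7]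

def extSetB : PySem.Set String := PySem.Set.ofList (extParts.flatMap PySem.Str.split₀)

-- B's 'for p in ("http://", "https://"): if … return False' — true iff some scheme guard fires
def schemeBad (test_str : String) : List String → Bool
  | [] => false
  | p :: rest =>
      if PySem.Str.startswith test_str p &&
          (test_str == p ||
            !(PySem.Chars.isalnum ((PySem.Str.pyGet? test_str (PySem.Str.len p)).getD ' ')))
      then true else schemeBad test_str rest

def is_possible_endpoint_alt (test_str : String) (class_names : List String) : Bool :=
  if schemeBad test_str ["http://", "https://"] then false
  else if PySem.Str.isIn " " test_str || !(PySem.Str.isIn "." test_str) then false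
  else
    let last := PySem.Str.slice test_str (some (PySem.Str.rfind test_str ".")) none
    extSetB.contains last && test_str != last

-- ===== PRECONDITION & SPEC =====
def Spec_is_possible_endpoint (test_str : String) (class_names : List String) (out : Bool) : Prop := out = is_possible_endpoint_alt test_str class_names
instance (test_str : String) (class_names : List String) (out : Bool) : Decidable (Spec_is_possible_endpoint test_str class_names out) := by unfold Spec_is_possible_endpoint; infer_instance

-- ===== CLAIM (what is proved, stated in full; the proofs are below) =====
def Claim_equal_is_possible_endpoint : Prop := ∀ (test_str : String) (class_names : List String), Dom_is_possible_endpoint test_str class_names → Spec_is_possible_endpoint test_str class_names (is_possible_endpoint test_str class_names)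

-- ===== LEMMAS AND PROOFS =====

-- splitting B's literals recovers A's extension list verbatim
set_option maxRecDepth 40000 in
set_option maxHeartbeats 1000000 in
lemma extPart0_split : PySem.Str.split₀ extPart0 = [".com",".net",".org",".edu",".gov",".mil",".af",".ax",".al",".dz",".as",".ad",".ao",".ai",".aq",".ag",".ar",".am",".aw",".ac",".au",".at",".az",".bs",".bh",".bd",".bb",".eus",".by",".be",".bz",".bj",".bm",".bt",".bo",".nl",".ba"] := by decide

set_option maxRecDepth 40000 in
set_option maxHeartbeats 1000000 in
lemma extPart1_split : PySem.Str.split₀ extPart1 = [".bw",".bv",".br",".io",".vg",".bn",".bg",".bf",".mm",".bi",".kh",".cm",".ca",".cv",".cat",".ky",".cf",".td",".cl",".cn",".cx",".co",".km",".cd",".cg",".ck",".cr",".ci",".hr",".cu",".cw",".cy",".cz",".dk",".dj",".dm",".do"] := by decide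

set_option maxRecDepth 40000 in
set_option maxHeartbeats 1000000 in
lemma extPart2_split : PySem.Str.split₀ extPart2 = [".tp",".ec",".eg",".sv",".gq",".er",".ee",".et",".eu",".fk",".fo",".fm",".fj",".fi",".fr",".gf",".pf",".tf",".ga",".gal",".gm",".ps",".ge",".de",".gh",".gi",".gr",".gl",".gd",".gp",".gu",".gt",".gg",".gn",".gw",".gy",".ht"] := by decide

set_option maxRecDepth 40000 in
set_option maxHeartbeats 1000000 in
lemma extPart3_split : PySem.Str.split₀ extPart3 = [".hm",".hn",".hk",".hu",".is",".in",".id",".ir",".iq",".ie",".im",".il",".it",".jm",".jp",".je",".jo",".kz",".ke",".ki",".kw",".kg",".la",".lv",".lb",".ls",".lr",".ly",".li",".lt",".lu",".mo",".mk",".mg",".mw",".my",".mv"] := by decide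

set_option maxRecDepth 40000 in
set_option maxHeartbeats 1000000 in
lemma extPart4_split : PySem.Str.split₀ extPart4 = [".ml",".mt",".mh",".mq",".mr",".mu",".yt",".mx",".md",".mc",".mn",".me",".ms",".ma",".mz",".mm",".na",".nr",".np",".nl",".nc",".nz",".ni",".ne",".ng",".nu",".nf",".tr",".kp",".mk",".mp",".no",".om",".pk",".pw",".ps",".pa"] := by decide

set_option maxRecDepth 40000 in
set_option maxHeartbeats 1000000 in
lemma extPart5_split : PySem.Str.split₀ extPart5 = [".pg",".py",".pe",".ph",".pn",".pl",".pt",".pr",".qa",".ro",".ru",".rw",".re",".an",".fr",".sh",".kn",".lc",".fr",".pm",".vc",".ws",".sm",".st",".sa",".sn",".rs",".sc",".sl",".sg",".nl",".an",".sk",".si",".sb",".za",".gs"] := by decide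

set_option maxRecDepth 40000 in
set_option maxHeartbeats 1000000 in
lemma extPart6_split : PySem.Str.split₀ extPart6 = [".kr",".ss",".es",".lk",".sd",".sr",".sj",".sz",".se",".ch",".sy",".tw",".tj",".tz",".th",".tg",".tk",".to",".tt",".tn",".tr",".tm",".tc",".tv",".ug",".ua",".ae",".uk",".us",".vi",".uy",".uz",".vu",".va",".ve",".vn",".wf"] := by decide

set_option maxRecDepth 40000 in
set_option maxHeartbeats 1000000 in
lemma extPart7_split : PySem.Str.split₀ extPart7 = [".ma",".ye",".zm",".zw"] := by decide

set_option maxRecDepth 40000 in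
set_option maxHeartbeats 1000000 in
lemma extSetB_eq : extSetB = PySem.Set.ofList extensions := by
  unfold extSetB extParts
  rw [show ([extPart0, extPart1, extPart2, extPart3, extPart4, extPart5, extPart6, extPart7].flatMap PySem.Str.split₀)
      = PySem.Str.split₀ extPart0 ++ PySem.Str.split₀ extPart1 ++ PySem.Str.split₀ extPart2 ++ PySem.Str.split₀ extPart3 ++ PySem.Str.split₀ extPart4 ++ PySem.Str.split₀ extPart5 ++ PySem.Str.split₀ extPart6 ++ PySem.Str.split₀ extPart7 from by
        simp [List.flatMap_cons]]
  rw [extPart0_split, extPart1_split, extPart2_split, extPart3_split, extPart4_split, extPart5_split, extPart6_split, extPart7_split]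
  decide

-- B's scheme loop equals A's two guards
lemma schemeBad_eq (s : String) :
    schemeBad s ["http://", "https://"]
      = (httpGuard s "http://" 7 || httpGuard s "https://" 8) := by
  show (if httpGuard s "http://" 7 then true
        else if httpGuard s "https://" 8 then true else false) = _
  by_cases h1 : httpGuard s "http://" 7 <;> by_cases h2 : httpGuard s "https://" 8 <;>
    simp [h1, h2]

-- every extension is '.' followed by a dot-free tail
lemma extensions_shape : ∀ e ∈ extensions, ∃ t : List Char,
    e.toList = '.' :: t ∧ '.' ∉ t := by
  intro e he
  fin_cases he <;> exact ⟨_, rfl, by decide⟩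

-- A's loop is an 'any' over the extension list
lemma epLoopA_eq_any (s : String) (l : List String) :
    epLoopA s l = l.any (fun ext =>
      PySem.Str.endswith s ext && s != ext && !(PySem.Str.isIn " " s)) := by
  induction l with
  | nil => rfl
  | cons e rest ih =>
      simp only [epLoopA, List.any_cons]
      cases h : (PySem.Str.endswith s e && s != e && !(PySem.Str.isIn " " s)) with
      | true => simp
      | false => simp [ih]

lemma rfind_go_found (pre tail : List Char) (h : '.' ∉ tail) :
    ∀ k, PySem.Chars.rfind.go (pre ++ '.' :: tail) ['.'] (pre.length + k) = pre.length := by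
  intro k
  induction k with
  | zero =>
      rw [Nat.add_zero, PySem.Chars.rfind.go.eq_def]
      cases hp : pre.length with
      | zero =>
          have hpe : pre = [] := List.eq_nil_of_length_eq_zero hp
          subst hpe; simp [List.isPrefixOf]
      | succ j =>
          have hdrop : List.drop (j + 1) (pre ++ '.' :: tail) = '.' :: tail := by
            rw [← hp, List.drop_left]
          simp [hdrop, List.isPrefixOf]
  | succ k ih =>
      have hrw : pre.length + (k + 1) = (pre.length + k) + 1 := by omega
      rw [hrw, PySem.Chars.rfind.go.eq_def]
      simp only [Nat.add_one]
      have hdrop : List.drop (pre.length + k + 1) (pre ++ '.' :: tail)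
          = List.drop k tail := by
        rw [show pre.length + k + 1 = pre.length + (k + 1) by omega,
            List.drop_length_add_append]
        simp
      cases hd : List.drop k tail with
      | nil => simpa [hdrop, hd] using ih
      | cons c cs =>
          have hc : c ∈ tail := List.mem_of_mem_drop (hd ▸ List.mem_cons_self ..)
          have hb : ('.' == c) = false := by
            simp only [beq_eq_false_iff_ne, ne_eq]
            intro hcc; exact h (by rw [hcc]; exact hc)
          simpa [hdrop, hd, List.isPrefixOf, hb] using ih

lemma exists_last_dot (cs : List Char) (h : '.' ∈ cs) :
    ∃ pre tail, cs = pre ++ '.' :: tail ∧ '.' ∉ tail := by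
  induction cs with
  | nil => cases h
  | cons c rest ih =>
      by_cases hr : '.' ∈ rest
      · obtain ⟨p, t, hpt, hnt⟩ := ih hr
        exact ⟨c :: p, t, by simp [hpt], hnt⟩
      · have hc : c = '.' := by
          rcases List.mem_cons.mp h with h1 | h1
          · exact h1.symm
          · exact absurd h1 hr
        exact ⟨[], rest, by simp [hc], hr⟩

-- two suffixes that both start at a dot with dot-free remainder coincide
lemma suffix_dot_unique {cs t1 t2 : List Char}
    (h1 : ('.' :: t1) <:+ cs) (h2 : ('.' :: t2) <:+ cs)
    (n1 : '.' ∉ t1) (n2 : '.' ∉ t2) : t1 = t2 := by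
  rcases List.suffix_or_suffix_of_suffix h1 h2 with h | h
  · rcases h with ⟨q, hq⟩
    cases q with
    | nil => simpa using hq
    | cons a as =>
        exfalso
        apply n2
        simp only [List.cons_append] at hq
        injection hq with _ h2
        rw [← h2]
        simp
  · rcases h with ⟨q, hq⟩
    cases q with
    | nil =>
        have := hq.symm
        simpa using this
    | cons a as =>
        exfalso
        apply n1
        simp only [List.cons_append] at hq
        injection hq with _ h2
        rw [← h2]
        simp

-- no extension matches as suffix when the string has no dot
lemma any_false_of_no_dot (s : String) (hdot : PySem.Str.isIn "." s = false) :
    (extensions.any (fun ext =>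
      PySem.Str.endswith s ext && s != ext && !(PySem.Str.isIn " " s))) = false := by
  rw [List.any_eq_false]
  intro e he hcond
  rw [Bool.and_eq_true, Bool.and_eq_true] at hcond
  obtain ⟨⟨hes, -⟩, -⟩ := hcond
  obtain ⟨t, ht, -⟩ := extensions_shape e he
  have hsufe : e.toList <:+ s.toList := by
    rw [PySem.Str.endswith_eq] at hes
    exact (PySem.Chars.endswith_iff _ _).mp hes
  have hmem : '.' ∈ s.toList := List.IsSuffix.mem (by simp [ht]) hsufe
  have : PySem.Str.isIn "." s = true := by
    rw [PySem.Str.isIn_eq]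
    rw [show (".".toList) = ['.'] from rfl, PySem.Chars.isIn_iff_infix]
    exact (List.singleton_infix_iff '.' s.toList).mpr hmem
  rw [this] at hdot
  exact absurd hdot (by simp)

-- the last-dot suffix of s, when '.' occurs at position pre.length with dot-free tail
lemma slice_rfind_eq (s : String) (pre tail : List Char)
    (hpt : s.toList = pre ++ '.' :: tail) (hnt : '.' ∉ tail) :
    (PySem.Str.slice s (some (PySem.Str.rfind s ".")) none).toList = '.' :: tail := by
  have hrf : PySem.Str.rfind s "." = (pre.length : Int) := by
    rw [PySem.Str.rfind_eq]
    show PySem.Chars.rfind s.toList ['.'] = (pre.length : Int)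
    unfold PySem.Chars.rfind
    rw [hpt]
    have := rfind_go_found pre tail hnt (tail.length + 1)
    simpa [List.length_append] using this
  rw [hrf]
  have hsl : PySem.List.slice (pre ++ '.' :: tail) (some ((pre.length : Int))) none
      = List.drop pre.length (pre ++ '.' :: tail) := by
    have h0 := PySem.List.slice_from (pre ++ '.' :: tail) (a := (pre.length : Int)) (by positivity)
    rw [h0, Int.toNat_natCast]
  simp only [PySem.Str.toList_slice, PySem.Chars.slice_eq_listSlice, hpt, hsl, List.drop_left]

-- the two post-guard computations agree
lemma core_eq (s : String) :
    epLoopA s extensions =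
      (if PySem.Str.isIn " " s || !(PySem.Str.isIn "." s) then false
       else
         let last := PySem.Str.slice s (some (PySem.Str.rfind s ".")) none
         extSetB.contains last && s != last) := by
  rw [epLoopA_eq_any, extSetB_eq]
  by_cases hsp : PySem.Str.isIn " " s = true
  · rw [if_pos (by rw [hsp]; rfl), List.any_eq_false]
    intro e he hcond
    rw [Bool.and_eq_true] at hcond
    have hc3 := hcond.2
    rw [Bool.not_eq_eq_eq_not, Bool.not_true] at hc3
    rw [hsp] at hc3
    cases hc3
  · have hsp' : PySem.Str.isIn " " s = false := by simpa using hsp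
    by_cases hdot : PySem.Str.isIn "." s = true
    case neg =>
      have hdot' : PySem.Str.isIn "." s = false := by simpa using hdot
      rw [if_pos (by rw [hdot']; simp)]
      exact any_false_of_no_dot s hdot'
    case pos =>
      rw [if_neg (by rw [hdot, hsp']; simp)]
      have hdotmem : '.' ∈ s.toList := by
        rw [PySem.Str.isIn_eq, show (".".toList) = ['.'] from rfl,
          PySem.Chars.isIn_iff_infix] at hdot
        exact hdot.sublist.mem (by simp)
      obtain ⟨pre, tail, hpt, hnt⟩ := exists_last_dot s.toList hdotmem
      set last := PySem.Str.slice s (some (PySem.Str.rfind s ".")) none with hlastdef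
      show (extensions.any fun ext =>
          PySem.Str.endswith s ext && s != ext && !(PySem.Str.isIn " " s))
        = ((PySem.Set.ofList extensions).contains last && s != last)
      have hslice : last.toList = '.' :: tail := slice_rfind_eq s pre tail hpt hnt
      by_cases hmem : last ∈ extensions
      case pos =>
        have hset : (PySem.Set.ofList extensions).contains last = true := by
          rw [PySem.Set.contains_iff]
          exact (PySem.Set.mem_ofList extensions last).mpr hmem
        rw [hset, Bool.true_and]
        by_cases hne : s = last
        case pos =>
          -- the whole string IS the extension: both sides false
          have hbne : (s != last) = false := by simp [hne]
          rw [hbne, List.any_eq_false]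
          intro e he hcond
          rw [Bool.and_eq_true, Bool.and_eq_true] at hcond
          obtain ⟨⟨hes, hne2⟩, -⟩ := hcond
          obtain ⟨t, ht, hnt2⟩ := extensions_shape e he
          have hsufe : e.toList <:+ s.toList := by
            rw [PySem.Str.endswith_eq] at hes
            exact (PySem.Chars.endswith_iff _ _).mp hes
          have heq : t = tail := suffix_dot_unique (ht ▸ hsufe) ⟨pre, hpt.symm⟩ hnt2 hnt
          apply (by simpa [bne_iff_ne] using hne2 : s ≠ e)
          apply String.toList_inj.mp
          rw [ht, heq, ← hslice, hne]
        case neg =>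
          have hbne : (s != last) = true := by simpa [bne_iff_ne] using hne
          rw [hbne, List.any_eq_true]
          refine ⟨last, hmem, ?_⟩
          have hsuf : PySem.Str.endswith s last = true := by
            rw [PySem.Str.endswith_eq]
            exact (PySem.Chars.endswith_iff _ _).mpr ⟨pre, by rw [hslice, ← hpt]⟩
          rw [hsuf, hsp']
          simpa [bne_iff_ne] using hne
      case neg =>
        have hset : (PySem.Set.ofList extensions).contains last = false := by
          rw [Bool.eq_false_iff, ne_eq, PySem.Set.contains_iff]
          exact fun hin => hmem ((PySem.Set.mem_ofList extensions last).mp hin)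
        rw [hset, Bool.false_and, List.any_eq_false]
        intro e he hcond
        rw [Bool.and_eq_true, Bool.and_eq_true] at hcond
        obtain ⟨⟨hes, -⟩, -⟩ := hcond
        obtain ⟨t, ht, hnt2⟩ := extensions_shape e he
        have hsufe : e.toList <:+ s.toList := by
          rw [PySem.Str.endswith_eq] at hes
          exact (PySem.Chars.endswith_iff _ _).mp hes
        have heq : t = tail := suffix_dot_unique (ht ▸ hsufe) ⟨pre, hpt.symm⟩ hnt2 hnt
        apply hmem
        have : last = e := by
          apply String.toList_inj.mp
          rw [ht, heq, hslice]
        exact this ▸ he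

-- ===== VERDICT (by name: the statement is the Claim_ definition above) =====
theorem is_possible_endpoint_spec : Claim_equal_is_possible_endpoint := by
  intro test_str class_names _
  unfold Spec_is_possible_endpoint is_possible_endpoint is_possible_endpoint_alt
  rw [schemeBad_eq]
  by_cases h1 : httpGuard test_str "http://" 7 = true
  · simp [h1]
  · by_cases h2 : httpGuard test_str "https://" 8 = true
    · simp [h1, h2]
    · rw [if_neg h1, if_neg h2, if_neg (by rw [h1 |> eq_false_of_ne_true, h2 |> eq_false_of_ne_true]; simp)]
      exact core_eq test_str
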